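-- pv_equiv track=rewrite | github.com/Romain-Gerard/algo | packcombi.py | is_run_sorted
-- ===== SOURCE A (Python) =====
-- def is_run_sorted(perm):
--     """
--     Vérifie si une permutation est run-sorted.
--     """
--     min = perm[0]
--     for i in range(len(perm) - 1):
--         if perm[i] > perm[i+1]:
--             if perm[i+1] >= min:
--                 min = perm[i+1]
--             else:
--                 return False
--     return True
-- ===== SOURCE B (Python) =====
-- def is_run_sorted(perm):
--     # Two passes: materialize the run-start values, then check they are non-decreasing.
--     starts = [perm[0]]
--     for i in range(len(perm) - 1):
--         if perm[i] > perm[i+1]: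
--             starts.append(perm[i+1])
--     return all(starts[j] <= starts[j+1] for j in range(len(starts) - 1))
-- ===== Notes on version B (the rewrite author's own statement) =====
-- stated objective: alternative
-- what changed: B splits the work into two passes - first materializing the list of run-start values, then checking that list is non-decreasing - instead of A's single interleaved loop with a running minimum and early return.
import Mathlib
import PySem

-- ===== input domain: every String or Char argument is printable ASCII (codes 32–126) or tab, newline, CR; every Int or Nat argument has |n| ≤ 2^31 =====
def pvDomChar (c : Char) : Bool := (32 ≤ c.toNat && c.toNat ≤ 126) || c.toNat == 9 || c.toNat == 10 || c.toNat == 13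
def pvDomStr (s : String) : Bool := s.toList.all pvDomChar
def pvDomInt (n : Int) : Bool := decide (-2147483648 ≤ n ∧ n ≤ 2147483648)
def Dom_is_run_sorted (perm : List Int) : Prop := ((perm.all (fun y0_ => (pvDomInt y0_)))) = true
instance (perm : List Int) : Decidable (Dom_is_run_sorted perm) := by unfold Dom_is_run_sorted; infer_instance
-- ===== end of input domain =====

-- B splits run-start extraction from the non-decreasing check (two passes) instead of A's
-- single interleaved loop with a running minimum; same cost, different decomposition.


-- ===== PORT A =====
-- loop over i in range(len(perm)-1), carrying `min` (= current run start) and the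
-- previous element; early `return False` becomes the `false` branch.
def isRunSortedLoop (mn prev : Int) : List Int → Bool
  | [] => true
  | x :: rest =>
    if prev > x then
      if x ≥ mn then isRunSortedLoop x x rest else false
    else isRunSortedLoop mn x rest

def is_run_sorted (perm : List Int) : Bool :=
  match perm with
  | [] => true          -- Python raises IndexError here (perm[0]); excluded by Pre_
  | h :: t => isRunSortedLoop h h t

-- ===== PORT B =====
-- pass 1: collect run starts (perm[i+1] whenever perm[i] > perm[i+1]), seeded with perm[0]
def collectStarts (prev : Int) : List Int → List Int
  | [] => []
  | x :: rest => if prev > x then x :: collectStarts x rest else collectStarts x rest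

-- pass 2: `all(starts[j] <= starts[j+1] ...)`
def nondecB : List Int → Bool
  | [] => true
  | [_] => true
  | a :: b :: rest => (a ≤ b) && nondecB (b :: rest)

def is_run_sorted_alt (perm : List Int) : Bool :=
  match perm with
  | [] => true          -- Python raises IndexError here (perm[0]); excluded by Pre_
  | h :: t => nondecB (h :: collectStarts h t)

-- ===== PRECONDITION & SPEC =====
-- Pre_ excludes only the empty list, on which both Pythons raise IndexError at perm[0].
def Pre_is_run_sorted (perm : List Int) : Prop := perm ≠ []
instance (perm : List Int) : Decidable (Pre_is_run_sorted perm) := by unfold Pre_is_run_sorted; infer_instance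
def pvWitness_is_run_sorted : List Int := ([3, 1, 2])

def Spec_is_run_sorted (perm : List Int) (out : Bool) : Prop := out = is_run_sorted_alt perm
instance (perm : List Int) (out : Bool) : Decidable (Spec_is_run_sorted perm out) := by unfold Spec_is_run_sorted; infer_instance

-- ===== CLAIM (what is proved, stated in full; the proofs are below) =====
def Claim_equal_is_run_sorted : Prop := ∀ (perm : List Int), Dom_is_run_sorted perm → Pre_is_run_sorted perm → Spec_is_run_sorted perm (is_run_sorted perm)

-- ===== LEMMAS AND PROOFS =====
-- A's loop equals "mn followed by the collected run starts is non-decreasing"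
theorem loop_eq_nondec (rest : List Int) : ∀ (mn prev : Int),
    isRunSortedLoop mn prev rest = nondecB (mn :: collectStarts prev rest) := by
  induction rest with
  | nil => intro mn prev; rfl
  | cons x rest ih =>
    intro mn prev
    by_cases h : prev > x
    · simp only [isRunSortedLoop, collectStarts, if_pos h, nondecB, ih x x]
      by_cases hx : x ≥ mn
      · simp [hx]
      · simp [hx]
    · simp only [isRunSortedLoop, collectStarts, if_neg h, ih mn x]

-- ===== VERDICT (by name: the statement is the Claim_ definition above) =====
theorem is_run_sorted_spec : Claim_equal_is_run_sorted := by
  intro perm _ hpre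
  unfold Spec_is_run_sorted
  match perm with
  | [] => exact absurd rfl hpre
  | h :: t => simpa [is_run_sorted, is_run_sorted_alt] using loop_eq_nondec t h h
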